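-- pv_equiv track=rewrite | github.com/mortlach/key-drag | src_cython/word_model.py | create_word_data
-- ===== SOURCE A (Python) =====
-- def create_word_data(runes_index, wli_data):
--     '''
--     Splits rune and wli data by word so they can be looked up in individual wordlists
--     :param runes_index: e.g. [7, 18, 20, 5, 3, 19, 18, 7]
--     :param wli_data: e.g. [[0, 3], [1, 3], [2, 3], [0, 2], [1, 2], [0, 7], [1, 7], [3, 7]]
--     :return: [[7, 18, 20, 5, 3, 19, 18], [7]], [[[0, 7], [1, 7], [2, 7], [3, 7], [4, 7], [5, 7], [6, 7]], [[0, 7]]]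
--     '''
--     return_runes, return_wli = [], []
--     nextrunes, nextwli = [], []
--     for rune, wli in zip(runes_index, wli_data):
--         if wli[0] == 0:
--             if nextrunes:
--                 return_runes.append(nextrunes)
--                 return_wli.append(nextwli)
--             nextwli, nextrunes = [wli], [rune]
--         else:
--             nextwli.append(wli)
--             nextrunes.append(rune)
--
--     if nextrunes:
--         return_runes.append(nextrunes)
--         return_wli.append(nextwli)
--
--     return return_runes, return_wli
-- ===== SOURCE B (Python) =====
-- def create_word_data(runes_index, wli_data):
--     # Recursive group extraction: each group is the first pending element plus
--     # the following run of non-boundary elements (wli[0] != 0); recurse on the rest.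
--     def go(pairs):
--         if not pairs:
--             return []
--         i = 1
--         while i < len(pairs) and pairs[i][1][0] != 0:
--             i += 1
--         return [pairs[:i]] + go(pairs[i:])
--     groups = go(list(zip(runes_index, wli_data)))
--     return [[r for r, _ in g] for g in groups], [[w for _, w in g] for g in groups]
-- ===== Notes on version B (the rewrite author's own statement) =====
-- stated objective: alternative
-- what changed: Replaces A's single forward pass with a flushed pending-group accumulator by a recursive span decomposition: each group is extracted as the head element plus the following run of non-boundary elements (wli[0] != 0), recursing on the remainder, then the groups are unzipped.
-- outside the precondition, e.g. on create_word_data([1, 2], [[0], []]): A raises IndexError, B raises IndexError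
import Mathlib
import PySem

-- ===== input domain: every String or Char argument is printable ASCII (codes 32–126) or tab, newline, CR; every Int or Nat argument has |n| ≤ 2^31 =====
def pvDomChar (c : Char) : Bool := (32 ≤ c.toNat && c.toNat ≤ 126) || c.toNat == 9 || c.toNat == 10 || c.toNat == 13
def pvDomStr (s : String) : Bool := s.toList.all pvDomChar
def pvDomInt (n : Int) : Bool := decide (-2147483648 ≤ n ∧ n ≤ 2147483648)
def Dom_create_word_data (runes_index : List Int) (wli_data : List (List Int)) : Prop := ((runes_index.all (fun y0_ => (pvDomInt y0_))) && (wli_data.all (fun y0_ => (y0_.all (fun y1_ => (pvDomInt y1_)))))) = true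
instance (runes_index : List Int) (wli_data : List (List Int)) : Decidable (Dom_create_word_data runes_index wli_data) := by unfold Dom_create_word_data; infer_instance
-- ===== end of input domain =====

-- B replaces A's forward accumulator scan by a recursive span decomposition
-- (head + run of non-boundary elements per group); same cost, different structure.

-- ===== PORT A =====
-- one loop step of A: state = (return_runes, return_wli, nextrunes, nextwli)
-- (wli[0] is ported as headD 0; Pre_ guarantees the inner lists reached are nonempty)
def aStep (s : List (List Int) × List (List (List Int)) × List Int × List (List Int))
    (p : Int × List Int) : List (List Int) × List (List (List Int)) × List Int × List (List Int) :=
  if p.2.headD 0 = 0 then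
    if s.2.2.1 ≠ [] then (s.1 ++ [s.2.2.1], s.2.1 ++ [s.2.2.2], [p.1], [p.2])
    else (s.1, s.2.1, [p.1], [p.2])
  else (s.1, s.2.1, s.2.2.1 ++ [p.1], s.2.2.2 ++ [p.2])

-- the trailing `if nextrunes:` flush after the loop
def aFin (s : List (List Int) × List (List (List Int)) × List Int × List (List Int)) :
    List (List Int) × List (List (List Int)) :=
  if s.2.2.1 ≠ [] then (s.1 ++ [s.2.2.1], s.2.1 ++ [s.2.2.2]) else (s.1, s.2.1)

def create_word_data (runes_index : List Int) (wli_data : List (List Int)) : List (List Int) × List (List (List Int)) :=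
  aFin ((List.zip runes_index wli_data).foldl aStep ([], [], [], []))

-- ===== PORT B =====
-- Source B's `go`: the inner while loop scanning to the first boundary is exactly a span:
-- pairs[:i] = head :: takeWhile non-boundary, pairs[i:] = dropWhile non-boundary.
def bGo : List (Int × List Int) → List (List (Int × List Int))
  | [] => []
  | p :: l =>
      (p :: l.takeWhile (fun q => q.2.headD 0 != 0)) :: bGo (l.dropWhile (fun q => q.2.headD 0 != 0))
  termination_by l => l.length
  decreasing_by
    exact Nat.lt_succ_of_le (List.length_dropWhile_le _ _)

def create_word_data_alt (runes_index : List Int) (wli_data : List (List Int)) : List (List Int) × List (List (List Int)) :=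
  let groups := bGo (List.zip runes_index wli_data)
  (groups.map (fun g => g.map Prod.fst), groups.map (fun g => g.map Prod.snd))

-- ===== PRECONDITION & SPEC =====
-- Pre_ excludes exactly the inputs on which Python A raises IndexError: an empty inner
-- list among the wli_data entries that the zip truncation actually reaches.
def Pre_create_word_data (runes_index : List Int) (wli_data : List (List Int)) : Prop :=
  ∀ w ∈ wli_data.take runes_index.length, w ≠ []
instance (runes_index : List Int) (wli_data : List (List Int)) : Decidable (Pre_create_word_data runes_index wli_data) := by unfold Pre_create_word_data; infer_instance

def pvWitness_create_word_data : List Int × List (List Int) :=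
  ([7, 18, 20, 5], [[0, 3], [1, 3], [0, 2], [1, 2]])

def Spec_create_word_data (runes_index : List Int) (wli_data : List (List Int)) (out : List (List Int) × List (List (List Int))) : Prop := out = create_word_data_alt runes_index wli_data
instance (runes_index : List Int) (wli_data : List (List Int)) (out : List (List Int) × List (List (List Int))) : Decidable (Spec_create_word_data runes_index wli_data out) := by unfold Spec_create_word_data; infer_instance

-- ===== CLAIM (what is proved, stated in full; the proofs are below) =====
def Claim_equal_create_word_data : Prop := ∀ (runes_index : List Int) (wli_data : List (List Int)), Dom_create_word_data runes_index wli_data → Pre_create_word_data runes_index wli_data → Spec_create_word_data runes_index wli_data (create_word_data runes_index wli_data)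

-- ===== LEMMAS AND PROOFS =====

-- boundary test
def isB (p : Int × List Int) : Bool := p.2.headD 0 == 0

-- A-style accumulator chunking: pending group `nr`, remaining list
def chunksA : List (Int × List Int) → List (Int × List Int) → List (List (Int × List Int))
  | nr, [] => if nr = [] then [] else [nr]
  | nr, p :: l =>
    if isB p then (if nr = [] then chunksA [p] l else nr :: chunksA [p] l)
    else chunksA (nr ++ [p]) l

def m1 (g : List (Int × List Int)) : List Int := g.map Prod.fst
def m2 (g : List (Int × List Int)) : List (List Int) := g.map Prod.snd

lemma isB_true_cond {p : Int × List Int} (h : isB p = true) : p.2.head?.getD 0 = 0 := by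
  simpa [isB, List.headD_eq_head?_getD] using h

lemma isB_false_cond {p : Int × List Int} (h : isB p = false) : ¬ p.2.head?.getD 0 = 0 := by
  simpa [isB, List.headD_eq_head?_getD] using h

-- A's fold + finalization computes chunksA
lemma A_char (l : List (Int × List Int)) : ∀ (gs : List (List (Int × List Int))) (g : List (Int × List Int)),
    aFin (l.foldl aStep (gs.map m1, gs.map m2, m1 g, m2 g))
    = ((gs ++ chunksA g l).map m1, (gs ++ chunksA g l).map m2) := by
  induction l with
  | nil =>
    intro gs g
    by_cases hg : g = [] <;> simp [aFin, chunksA, hg, m1, m2]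
  | cons p l ih =>
    intro gs g
    simp only [List.foldl_cons]
    cases hb : isB p with
    | true =>
      have hc := isB_true_cond hb
      by_cases hg : g = []
      · have h1 : aStep (gs.map m1, gs.map m2, m1 g, m2 g) p
            = (gs.map m1, gs.map m2, m1 [p], m2 [p]) := by
          simp [aStep, List.headD_eq_head?_getD, hc, hg, m1, m2]
        rw [h1]
        simpa [chunksA, hb, hg] using ih gs [p]
      · have h1 : aStep (gs.map m1, gs.map m2, m1 g, m2 g) p
            = ((gs ++ [g]).map m1, (gs ++ [g]).map m2, m1 [p], m2 [p]) := by
          simp [aStep, List.headD_eq_head?_getD, hc, hg, m1, m2]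
        rw [h1]
        have := ih (gs ++ [g]) [p]
        simpa [chunksA, hb, hg, List.append_assoc] using this
    | false =>
      have hc := isB_false_cond hb
      have h1 : aStep (gs.map m1, gs.map m2, m1 g, m2 g) p
          = (gs.map m1, gs.map m2, m1 (g ++ [p]), m2 (g ++ [p])) := by
        simp [aStep, List.headD_eq_head?_getD, hc, m1, m2]
      rw [h1]
      simpa [chunksA, hb] using ih gs (g ++ [p])

-- Source B's non-boundary predicate is !isB
lemma nb_eq : (fun q : Int × List Int => q.2.headD 0 != 0) = (fun q => !isB q) := by
  funext q; simp [isB, bne]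

lemma bGo_cons (p : Int × List Int) (l : List (Int × List Int)) :
    bGo (p :: l) = (p :: l.takeWhile (fun q => !isB q)) :: bGo (l.dropWhile (fun q => !isB q)) := by
  rw [bGo, nb_eq]

-- nonempty pending group: chunksA emits it extended by the non-boundary run, then recurses
lemma chunksA_ne (l : List (Int × List Int)) : ∀ nr, nr ≠ [] →
    chunksA nr l = (nr ++ l.takeWhile (fun q => !isB q)) :: bGo (l.dropWhile (fun q => !isB q)) := by
  induction l with
  | nil =>
    intro nr h
    simp [chunksA, bGo, h]
  | cons p l ih =>
    intro nr h
    cases hb : isB p with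
    | true =>
      have h2 := ih [p] (by simp)
      simp [chunksA, hb, h, List.takeWhile, List.dropWhile, h2, bGo_cons]
    | false =>
      have h2 := ih (nr ++ [p]) (by simp)
      simp [chunksA, hb, List.takeWhile, List.dropWhile, h2, List.append_assoc]

-- A's chunking from the empty pending group is exactly B's span decomposition
lemma chunksA_eq_bGo (l : List (Int × List Int)) : chunksA [] l = bGo l := by
  cases l with
  | nil => simp [chunksA, bGo]
  | cons p l =>
    cases hb : isB p with
    | true =>
      rw [bGo_cons]
      simp [chunksA, hb, chunksA_ne l [p] (by simp)]
    | false =>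
      rw [bGo_cons]
      simp [chunksA, hb, chunksA_ne l [p] (by simp)]

-- ===== VERDICT (by name: the statement is the Claim_ definition above) =====
theorem create_word_data_spec : Claim_equal_create_word_data := by
  intro ri wl _ _
  unfold Spec_create_word_data create_word_data create_word_data_alt
  have hA := A_char (List.zip ri wl) [] []
  simp only [List.map_nil, List.nil_append, m1, m2] at hA
  rw [hA, chunksA_eq_bGo]
  simp [m1, m2]
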